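-- pv_equiv track=rewrite | github.com/DakeQQ/Automatic-Speech-Recognition-ASR-ONNX | Whisper_V2_V3/Accuracy/Beam_Search/Export_Whisper.py | remove_repeated_parts
-- ===== SOURCE A (Python) =====
-- def remove_repeated_parts(ids, repeat_words_threshold, ids_len):
--     if ids_len <= repeat_words_threshold:
--         return ids
--     side_L = repeat_words_threshold // 2
--     side_R = side_L + 1
--     boundary = ids_len - side_L
--     for i in range(side_L, boundary):
--         for j in range(i + repeat_words_threshold, boundary):
--             check = []
--             for k in range(-side_L, side_R):
--                 if ids[j + k] == ids[i + k]:
--                     check.append(True)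
--                 else:
--                     check.append(False)
--                     break
--             if False not in check:
--                 return ids[: j - side_L]
--     return ids
-- ===== SOURCE B (Python) =====
-- def remove_repeated_parts(ids, repeat_words_threshold, ids_len):
--     if ids_len <= repeat_words_threshold:
--         return ids
--     side_L = repeat_words_threshold // 2
--     side_R = side_L + 1
--     boundary = ids_len - side_L
--     groups = {}
--     for p in range(side_L, boundary):
--         groups.setdefault((ids[p - side_L], ids[p + side_L]), []).append(p)
--     for i in range(side_L, boundary):
--         lst = groups[(ids[i - side_L], ids[i + side_L])]
--         t = i + repeat_words_threshold
--         lo, hi = 0, len(lst)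
--         while lo < hi:
--             mid = (lo + hi) // 2
--             if lst[mid] < t:
--                 lo = mid + 1
--             else:
--                 hi = mid
--         for j in lst[lo:]:
--             if all(ids[j + k] == ids[i + k] for k in range(-side_L, side_R)):
--                 return ids[: j - side_L]
--     return ids
-- ===== Notes on version B (the rewrite author's own statement) =====
-- stated objective: alternative
-- what changed: A's inner scan over all later positions with element-by-element window comparison is replaced by a dict built in one pass grouping positions by the window's (first, last) elements; per i a hand-rolled binary search skips candidates below i + threshold and only those candidates are verified element-wise. The index usually removes A's quadratic rescan, but the up-front grouping pass costs O(n) even where A exits immediately, so a timing run does not certify a uniform speed-up.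
-- outside the precondition, e.g. on remove_repeated_parts([1, 2, 3, 4], -2, 4): A returns [1, 2], B raises IndexError; on remove_repeated_parts([1, 1, 3], 1, 4): A returns [1], B raises IndexError
import Mathlib
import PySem

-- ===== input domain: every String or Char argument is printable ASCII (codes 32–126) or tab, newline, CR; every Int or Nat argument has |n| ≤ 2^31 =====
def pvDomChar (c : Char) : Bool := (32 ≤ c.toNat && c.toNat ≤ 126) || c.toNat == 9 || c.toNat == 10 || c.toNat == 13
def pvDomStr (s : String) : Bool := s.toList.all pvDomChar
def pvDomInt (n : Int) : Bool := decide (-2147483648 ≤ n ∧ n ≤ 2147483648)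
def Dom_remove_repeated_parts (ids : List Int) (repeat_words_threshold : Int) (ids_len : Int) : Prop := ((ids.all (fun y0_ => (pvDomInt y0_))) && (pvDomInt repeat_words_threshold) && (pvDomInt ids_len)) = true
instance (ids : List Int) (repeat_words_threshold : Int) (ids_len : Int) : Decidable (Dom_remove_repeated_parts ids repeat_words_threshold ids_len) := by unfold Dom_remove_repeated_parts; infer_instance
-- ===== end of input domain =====

-- B replaces A's inner scan over all later positions by a dict built in one pass grouping
-- positions by the window's (first, last) elements; per i a binary search skips positions
-- below i + threshold and only those candidates are verified element-wise (objective: alternative).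

-- ===== PORT A =====
-- the 'for k' loop with its early break; 'False not in check' is the returned Bool
def pvA_check (ids : List Int) (i j : Int) : List Int → Bool
  | [] => true
  | k :: ks =>
    if PySem.List.pyGetD ids (j + k) 0 == PySem.List.pyGetD ids (i + k) 0
    then pvA_check ids i j ks
    else false

-- the 'for j' loop; 'some r' = early return of ids[: j - side_L]
def pvA_jloop (ids : List Int) (sL sR i : Int) : List Int → Option (List Int)
  | [] => none
  | j :: js =>
    if pvA_check ids i j (PySem.List.pyRange (-sL) sR 1)
    then some (PySem.List.slice ids none (some (j - sL)))
    else pvA_jloop ids sL sR i js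

-- the 'for i' loop
def pvA_iloop (ids : List Int) (thr sL sR boundary : Int) : List Int → List Int
  | [] => ids
  | i :: is' =>
    match pvA_jloop ids sL sR i (PySem.List.pyRange (i + thr) boundary 1) with
    | some r => r
    | none => pvA_iloop ids thr sL sR boundary is'

def remove_repeated_parts (ids : List Int) (repeat_words_threshold : Int) (ids_len : Int) : List Int :=
  if ids_len ≤ repeat_words_threshold then ids
  else
    let sL := PySem.Int.floordiv repeat_words_threshold 2
    let sR := sL + 1
    let boundary := ids_len - sL
    pvA_iloop ids repeat_words_threshold sL sR boundary (PySem.List.pyRange sL boundary 1)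

-- ===== PORT B =====
-- the grouping key (ids[p - side_L], ids[p + side_L])
def pvB_key (ids : List Int) (sL p : Int) : Int × Int :=
  (PySem.List.pyGetD ids (p - sL) 0, PySem.List.pyGetD ids (p + sL) 0)

-- groups.setdefault(key, []).append(p) over all p
def pvB_dict (ids : List Int) (sL : Int) (ps : List Int) : PySem.Dict (Int × Int) (List Int) :=
  ps.foldl (fun d p => d.modify (pvB_key ids sL p) [] (· ++ [p])) PySem.Dict.empty

-- the 'while lo < hi' binary-search loop (hand-rolled bisect_left); the fuel argument
-- (hi - lo at the call site) only makes the recursion structural, it never cuts the loop short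
def pvB_bisect (lst : List Int) (t : Int) : Nat → Nat → Nat → Nat
  | 0, lo, _ => lo
  | fuel + 1, lo, hi =>
    if lo < hi then
      let mid := (lo + hi) / 2
      if PySem.List.pyGetD lst (mid : Int) 0 < t
      then pvB_bisect lst t fuel (mid + 1) hi
      else pvB_bisect lst t fuel lo mid
    else lo

-- 'for j in lst[lo:]: if all(…): return …'
def pvB_scan (ids : List Int) (sL sR i : Int) : List Int → Option Int
  | [] => none
  | j :: js =>
    if (PySem.List.pyRange (-sL) sR 1).all
         (fun k => PySem.List.pyGetD ids (j + k) 0 == PySem.List.pyGetD ids (i + k) 0)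
    then some j
    else pvB_scan ids sL sR i js

def pvB_iloop (ids : List Int) (thr sL sR : Int) (d : PySem.Dict (Int × Int) (List Int)) : List Int → List Int
  | [] => ids
  | i :: is' =>
    let lst := d.getD (pvB_key ids sL i) []
    let lo := pvB_bisect lst (i + thr) lst.length 0 lst.length
    match pvB_scan ids sL sR i (lst.drop lo) with
    | some j => PySem.List.slice ids none (some (j - sL))
    | none => pvB_iloop ids thr sL sR d is'

def remove_repeated_parts_alt (ids : List Int) (repeat_words_threshold : Int) (ids_len : Int) : List Int :=
  if ids_len ≤ repeat_words_threshold then ids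
  else
    let sL := PySem.Int.floordiv repeat_words_threshold 2
    let sR := sL + 1
    let boundary := ids_len - sL
    let d := pvB_dict ids sL (PySem.List.pyRange sL boundary 1)
    pvB_iloop ids repeat_words_threshold sL sR d (PySem.List.pyRange sL boundary 1)

-- ===== PRECONDITION & SPEC =====
-- Pre_ excludes inputs where A raises IndexError (ids_len reaching past len(ids) while the
-- loops run) and negative thresholds, on which A's comparison window is empty so the first
-- probed pair vacuously "matches" and the truncation point is an accident of A's loop order.
def Pre_remove_repeated_parts (ids : List Int) (repeat_words_threshold : Int) (ids_len : Int) : Prop :=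
  ids_len ≤ repeat_words_threshold ∨ (0 ≤ repeat_words_threshold ∧ ids_len ≤ (ids.length : Int))
instance (ids : List Int) (repeat_words_threshold : Int) (ids_len : Int) : Decidable (Pre_remove_repeated_parts ids repeat_words_threshold ids_len) := by unfold Pre_remove_repeated_parts; infer_instance

def pvWitness_remove_repeated_parts : List Int × Int × Int := ([1, 2, 1, 2, 1, 2], 2, 6)

def Spec_remove_repeated_parts (ids : List Int) (repeat_words_threshold : Int) (ids_len : Int) (out : List Int) : Prop := out = remove_repeated_parts_alt ids repeat_words_threshold ids_len
instance (ids : List Int) (repeat_words_threshold : Int) (ids_len : Int) (out : List Int) : Decidable (Spec_remove_repeated_parts ids repeat_words_threshold ids_len out) := by unfold Spec_remove_repeated_parts; infer_instance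

-- ===== CLAIM (what is proved, stated in full; the proofs are below) =====
def Claim_equal_remove_repeated_parts : Prop := ∀ (ids : List Int) (repeat_words_threshold : Int) (ids_len : Int), Dom_remove_repeated_parts ids repeat_words_threshold ids_len → Pre_remove_repeated_parts ids repeat_words_threshold ids_len → Spec_remove_repeated_parts ids repeat_words_threshold ids_len (remove_repeated_parts ids repeat_words_threshold ids_len)

-- ===== LEMMAS AND PROOFS =====

-- the full comparison window at position p, as a list (proof-only abbreviation)
def pvWin (ids : List Int) (sL sR p : Int) : List Int :=
  (PySem.List.pyRange (-sL) sR 1).map (fun k => PySem.List.pyGetD ids (p + k) 0)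

-- the element-wise 'all' over window offsets succeeds iff the two windows are equal lists
theorem all_eq_win (ids : List Int) (sL sR i j : Int) :
    ((PySem.List.pyRange (-sL) sR 1).all
       (fun k => PySem.List.pyGetD ids (j + k) 0 == PySem.List.pyGetD ids (i + k) 0))
      = (pvWin ids sL sR j == pvWin ids sL sR i) := by
  rw [Bool.eq_iff_iff]
  simp only [List.all_eq_true, beq_iff_eq, pvWin, List.map_inj_left]

-- A's inner k-loop (with its early break) succeeds iff all window elements agree
theorem pvA_check_eq_all (ids : List Int) (i j : Int) (ks : List Int) :
    pvA_check ids i j ks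
      = ks.all (fun k => PySem.List.pyGetD ids (j + k) 0 == PySem.List.pyGetD ids (i + k) 0) := by
  induction ks with
  | nil => rfl
  | cons k ks ih =>
    simp only [pvA_check, List.all_cons]
    by_cases h : PySem.List.pyGetD ids (j + k) 0 == PySem.List.pyGetD ids (i + k) 0
    · simp [h, ih]
    · simp [h]

theorem pvA_check_eq_win (ids : List Int) (sL sR i j : Int) :
    pvA_check ids i j (PySem.List.pyRange (-sL) sR 1)
      = (pvWin ids sL sR j == pvWin ids sL sR i) := by
  rw [pvA_check_eq_all, all_eq_win]

-- A's j-loop is find? followed by the slice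
theorem pvA_jloop_eq_find (ids : List Int) (sL sR i : Int) (js : List Int) :
    pvA_jloop ids sL sR i js
      = (js.find? (fun j => pvWin ids sL sR j == pvWin ids sL sR i)).map
          (fun j => PySem.List.slice ids none (some (j - sL))) := by
  induction js with
  | nil => rfl
  | cons j js ih =>
    simp only [pvA_jloop, pvA_check_eq_win, List.find?_cons]
    by_cases h : pvWin ids sL sR j == pvWin ids sL sR i
    · simp [h]
    · simp [h, ih]

-- B's candidate scan is find? on the window-equality predicate
theorem pvB_scan_eq_find (ids : List Int) (sL sR i : Int) (l : List Int) :
    pvB_scan ids sL sR i l = l.find? (fun j => pvWin ids sL sR j == pvWin ids sL sR i) := by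
  induction l with
  | nil => rfl
  | cons j js ih =>
    simp only [pvB_scan, all_eq_win, List.find?_cons]
    by_cases h : pvWin ids sL sR j == pvWin ids sL sR i
    · simp [h]
    · simp [h, ih]

-- equal windows have equal grouping keys (first and last window element)
theorem key_of_win (ids : List Int) (sL i j : Int) (hsL : 0 ≤ sL)
    (hw : pvWin ids sL (sL + 1) j = pvWin ids sL (sL + 1) i) :
    pvB_key ids sL j = pvB_key ids sL i := by
  rw [pvWin, pvWin, List.map_inj_left] at hw
  have h1 := hw (-sL) (PySem.List.mem_pyRange_one.2 (by omega))
  have h2 := hw sL (PySem.List.mem_pyRange_one.2 (by omega))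
  simp only [pvB_key, Int.sub_eq_add_neg]
  rw [h1, h2]

-- the grouping dict: each key's entry is exactly the filtered position list
theorem pvB_dict_getD_aux (ids : List Int) (sL : Int) (w : Int × Int) (ps : List Int)
    (d : PySem.Dict (Int × Int) (List Int)) :
    (ps.foldl (fun d p => d.modify (pvB_key ids sL p) [] (· ++ [p])) d).getD w []
      = d.getD w [] ++ ps.filter (fun p => pvB_key ids sL p == w) := by
  induction ps generalizing d with
  | nil => simp
  | cons p ps ih =>
    simp only [List.foldl_cons, List.filter_cons, ih]
    rw [PySem.Dict.getD_modify]
    by_cases h : pvB_key ids sL p = w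
    · subst h
      simp
    · have h' : (pvB_key ids sL p == w) = false := by simp [h]
      rw [if_neg (fun hh => h hh.symm), h']
      simp

theorem pvB_dict_getD (ids : List Int) (sL : Int) (w : Int × Int) (ps : List Int) :
    (pvB_dict ids sL ps).getD w [] = ps.filter (fun p => pvB_key ids sL p == w) := by
  unfold pvB_dict
  rw [pvB_dict_getD_aux]
  simp

-- find? only depends on the predicate's values on the list's members
theorem find?_mem_congr {α : Type} (p q : α → Bool) (l : List α)
    (h : ∀ x ∈ l, p x = true ↔ q x = true) : l.find? p = l.find? q := by
  induction l with
  | nil => rfl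
  | cons x xs ih =>
    simp only [List.find?_cons]
    by_cases hp : p x
    · rw [hp, ((h x (List.mem_cons_self ..)).1 hp : q x = true)]
    · have hq : q x = false := by
        by_cases hq' : q x
        · exact absurd ((h x (List.mem_cons_self ..)).2 hq') hp
        · simpa using hq'
      rw [Bool.eq_false_iff.2 hp, hq]
      exact ih (fun y hy => h y (List.mem_cons_of_mem _ hy))

-- the binary search: bounds, and every element left of the result is < t, right of it ≥ t
theorem pvB_bisect_spec_aux (lst : List Int) (t : Int) (n : Nat) :
    ∀ lo hi : Nat, hi - lo ≤ n → hi ≤ lst.length → lo ≤ hi → lst.Pairwise (· < ·) →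
    lo ≤ pvB_bisect lst t n lo hi ∧ pvB_bisect lst t n lo hi ≤ hi ∧
    (∀ m : Nat, lo ≤ m → m < pvB_bisect lst t n lo hi → ∀ hm : m < lst.length, lst[m] < t) ∧
    (∀ m : Nat, pvB_bisect lst t n lo hi ≤ m → m < hi → ∀ hm : m < lst.length, t ≤ lst[m]) := by
  induction n with
  | zero =>
    intro lo hi hfuel hhi hlo hs
    rw [pvB_bisect]
    exact ⟨le_refl _, by omega, fun m h1 h2 _ => by omega, fun m h1 h2 _ => by omega⟩
  | succ n ih =>
    intro lo hi hfuel hhi hlo hs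
    by_cases hlt : lo < hi
    · have hmlo : lo ≤ (lo + hi) / 2 := by omega
      have hmlt : (lo + hi) / 2 < hi := by omega
      have hmlen : (lo + hi) / 2 < lst.length := by omega
      rw [pvB_bisect]
      simp only [if_pos hlt]
      by_cases hmid : PySem.List.pyGetD lst (((lo + hi) / 2 : Nat) : Int) 0 < t
      · simp only [if_pos hmid]
        obtain ⟨r1, r2, r3, r4⟩ := ih ((lo + hi) / 2 + 1) hi (by omega) hhi (by omega) hs
        rw [PySem.List.pyGetD_ofNat lst _ 0 hmlen] at hmid
        refine ⟨by omega, r2, ?_, r4⟩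
        intro m hm1 hm2 hm
        by_cases hcase : (lo + hi) / 2 + 1 ≤ m
        · exact r3 m hcase hm2 hm
        · rcases Nat.lt_or_ge m ((lo + hi) / 2) with hlt' | hge
          · exact lt_trans (List.pairwise_iff_getElem.1 hs m _ hm hmlen hlt') hmid
          · have : m = (lo + hi) / 2 := by omega
            subst this
            exact hmid
      · simp only [if_neg hmid]
        obtain ⟨r1, r2, r3, r4⟩ := ih lo ((lo + hi) / 2) (by omega) (by omega) (by omega) hs
        rw [PySem.List.pyGetD_ofNat lst _ 0 hmlen] at hmid
        refine ⟨r1, by omega, r3, ?_⟩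
        intro m hm1 hm2 hm
        by_cases hcase : m < (lo + hi) / 2
        · exact r4 m hm1 hcase hm
        · rcases Nat.lt_or_ge ((lo + hi) / 2) m with hlt' | hge
          · exact le_of_lt (lt_of_le_of_lt (by omega : t ≤ lst[(lo + hi) / 2])
              (List.pairwise_iff_getElem.1 hs _ m hmlen hm hlt'))
          · have : m = (lo + hi) / 2 := by omega
            subst this
            omega
    · rw [pvB_bisect, if_neg hlt]
      exact ⟨le_refl _, by omega, fun m h1 h2 _ => by omega, fun m h1 h2 _ => by omega⟩

theorem pvB_bisect_spec (lst : List Int) (t : Int) (lo hi : Nat) (hhi : hi ≤ lst.length)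
    (hlo : lo ≤ hi) (hs : lst.Pairwise (· < ·)) :
    lo ≤ pvB_bisect lst t (hi - lo) lo hi ∧ pvB_bisect lst t (hi - lo) lo hi ≤ hi ∧
    (∀ m : Nat, lo ≤ m → m < pvB_bisect lst t (hi - lo) lo hi → ∀ hm : m < lst.length, lst[m] < t) ∧
    (∀ m : Nat, pvB_bisect lst t (hi - lo) lo hi ≤ m → m < hi → ∀ hm : m < lst.length, t ≤ lst[m]) :=
  pvB_bisect_spec_aux lst t (hi - lo) lo hi (le_refl _) hhi hlo hs

-- dropping up to the bisection point is filtering to the elements ≥ t (on a sorted list)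
theorem drop_bisect_eq_filter (lst : List Int) (t : Int) (hs : lst.Pairwise (· < ·)) :
    lst.drop (pvB_bisect lst t lst.length 0 lst.length) = lst.filter (fun j => decide (t ≤ j)) := by
  obtain ⟨r1, r2, r3, r4⟩ := pvB_bisect_spec lst t 0 lst.length (le_refl _) (by omega) hs
  simp only [Nat.sub_zero] at r1 r2 r3 r4
  set r := pvB_bisect lst t lst.length 0 lst.length with hr
  conv_rhs => rw [← List.take_append_drop r lst]
  rw [List.filter_append]
  have htake : (lst.take r).filter (fun j => decide (t ≤ j)) = [] := by
    rw [List.filter_eq_nil_iff]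
    intro a ha
    obtain ⟨m, hm, hget⟩ := List.mem_iff_getElem.1 ha
    have hlen : (lst.take r).length = min r lst.length := by simp
    have hmr : m < r := by omega
    have hmlen : m < lst.length := by omega
    rw [List.getElem_take] at hget
    have := r3 m (by omega) hmr hmlen
    simp only [decide_eq_true_eq]
    omega
  have hdrop : (lst.drop r).filter (fun j => decide (t ≤ j)) = lst.drop r := by
    rw [List.filter_eq_self]
    intro a ha
    obtain ⟨m, hm, hget⟩ := List.mem_iff_getElem.1 ha
    have hlen : (lst.drop r).length = lst.length - r := by simp
    have hmlen : r + m < lst.length := by omega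
    rw [List.getElem_drop] at hget
    have := r4 (r + m) (by omega) (by omega) hmlen
    simp only [decide_eq_true_eq]
    omega
  rw [htake, hdrop, List.nil_append]

-- restricting a find? over [sL, b) to elements ≥ t is a find? over [t, b)
theorem find?_range_restrict (Q : Int → Bool) (sL t b : Int) (hst : sL ≤ t) :
    (PySem.List.pyRange sL b 1).find? (fun j => Q j && decide (t ≤ j))
      = (PySem.List.pyRange t b 1).find? Q := by
  by_cases htb : t ≤ b
  · rw [PySem.List.pyRange_one_append sL t b hst htb, List.find?_append]
    have h1 : (PySem.List.pyRange sL t 1).find? (fun j => Q j && decide (t ≤ j)) = none := by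
      rw [List.find?_eq_none]
      intro x hx
      have := (PySem.List.mem_pyRange_one).1 hx
      simp only [Bool.and_eq_true, decide_eq_true_eq]
      omega
    rw [h1, Option.none_or]
    apply find?_mem_congr
    intro x hx
    have := (PySem.List.mem_pyRange_one).1 hx
    simp only [Bool.and_eq_true, decide_eq_true_eq]
    constructor
    · rintro ⟨hq, _⟩; exact hq
    · intro hq; exact ⟨hq, by omega⟩
  · have h2 : PySem.List.pyRange t b 1 = [] := PySem.List.pyRange_one_eq_nil (by omega)
    rw [h2]
    simp only [List.find?_nil]
    rw [List.find?_eq_none]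
    intro x hx
    have := (PySem.List.mem_pyRange_one).1 hx
    simp only [Bool.and_eq_true, decide_eq_true_eq]
    omega

-- B's per-i lookup (group, bisect, verify) finds exactly A's first matching j ≥ i + thr
theorem pvB_lookup_eq (ids : List Int) (thr sL b i : Int) (hi : sL ≤ i) (hthr : 0 ≤ thr)
    (hsL : 0 ≤ sL) :
    (let lst := (pvB_dict ids sL (PySem.List.pyRange sL b 1)).getD (pvB_key ids sL i) [];
     pvB_scan ids sL (sL + 1) i (lst.drop (pvB_bisect lst (i + thr) lst.length 0 lst.length)))
      = (PySem.List.pyRange (i + thr) b 1).find?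
          (fun j => pvWin ids sL (sL + 1) j == pvWin ids sL (sL + 1) i) := by
  simp only [pvB_dict_getD]
  have hsorted : ((PySem.List.pyRange sL b 1).filter
      (fun p => pvB_key ids sL p == pvB_key ids sL i)).Pairwise (· < ·) :=
    List.Pairwise.filter _ (PySem.List.pairwise_lt_pyRange_one sL b)
  rw [pvB_scan_eq_find, drop_bisect_eq_filter _ _ hsorted, List.find?_filter, List.find?_filter]
  have : (fun a => decide ((pvB_key ids sL a == pvB_key ids sL i) = true ∧
        (decide (decide (i + thr ≤ a) = true ∧
          (pvWin ids sL (sL + 1) a == pvWin ids sL (sL + 1) i) = true)) = true))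
      = (fun j : Int => (pvWin ids sL (sL + 1) j == pvWin ids sL (sL + 1) i)
          && decide (i + thr ≤ j)) := by
    funext a
    by_cases hw : pvWin ids sL (sL + 1) a = pvWin ids sL (sL + 1) i
    · have hk := key_of_win ids sL i a hsL hw
      by_cases ht : i + thr ≤ a <;> simp [hw, hk, ht]
    · simp [hw]
  rw [this]
  exact find?_range_restrict _ sL (i + thr) b (by omega)

-- the two outer loops agree index-by-index
theorem loops_eq (ids : List Int) (thr sL b : Int) (hthr : 0 ≤ thr) (hsL : 0 ≤ sL)
    (l : List Int) (hl : ∀ i ∈ l, sL ≤ i) :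
    pvA_iloop ids thr sL (sL + 1) b l
      = pvB_iloop ids thr sL (sL + 1) (pvB_dict ids sL (PySem.List.pyRange sL b 1)) l := by
  induction l with
  | nil => rfl
  | cons i is' ih =>
    have hi : sL ≤ i := hl i (List.mem_cons_self ..)
    simp only [pvA_iloop, pvB_iloop, pvA_jloop_eq_find,
      pvB_lookup_eq ids thr sL b i hi hthr hsL]
    cases (PySem.List.pyRange (i + thr) b 1).find?
        (fun j => pvWin ids sL (sL + 1) j == pvWin ids sL (sL + 1) i) with
    | none => simpa using ih (fun x hx => hl x (List.mem_cons_of_mem _ hx))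
    | some j => rfl

-- ===== VERDICT (by name: the statement is the Claim_ definition above) =====
theorem remove_repeated_parts_spec : Claim_equal_remove_repeated_parts := by
  intro ids thr ids_len _hDom hPre
  unfold Spec_remove_repeated_parts remove_repeated_parts remove_repeated_parts_alt
  by_cases h : ids_len ≤ thr
  · simp [h]
  · have hthr : 0 ≤ thr := by
      rcases hPre with h1 | ⟨h2, _⟩
      · omega
      · exact h2
    have hsL : 0 ≤ PySem.Int.floordiv thr 2 := Int.fdiv_nonneg hthr (by omega)
    simp only [h, if_false]
    apply loops_eq
    · exact hthr
    · exact hsL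
    · intro i hi
      exact ((PySem.List.mem_pyRange_one).1 hi).1
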